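-- pv_equiv track=rewrite | github.com/justinstimatze/score | compile_strips.py | generate_qfi_sections
-- ===== SOURCE A (Python) =====
-- def generate_qfi_sections(plays: list) -> str:
--     """Regenerate the 4 auto-deterministic QFI sections from parsed plays.
--
--     Sections: By Beat Function, By Feedback Type, By Frame Requirement, By Dwell Time.
--     Multi-value fields (separated by ' · ') are split so a play appears in each sub-group.
--     Play IDs within each group are sorted alphabetically.
--     """
--     from collections import defaultdict
--
--     FIELDS = [
--         ("BEAT_FUNCTION",     "By Beat Function"),
--         ("FEEDBACK_TYPE",     "By Feedback Type"),
--         ("FRAME_REQUIREMENT", "By Frame Requirement"),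
--         ("DWELL_TIME",        "By Dwell Time"),
--     ]
--
--     section_parts = []
--     for field, heading in FIELDS:
--         idx: dict[str, list[str]] = defaultdict(list)
--         for play in plays:
--             val = play.get(field, "").strip()
--             if not val:
--                 continue
--             if " · " in val:
--                 for v in val.split(" · "):
--                     v = v.strip()
--                     if v:
--                         idx[v].append(play["id"])
--             else:
--                 idx[val].append(play["id"])
--         for v in idx:
--             idx[v].sort()
--
--         lines = [f"### {heading}", ""]
--         for val in sorted(idx.keys()):
--             pids = idx[val]
--             lines.append(f"**{val}** ({len(pids)}): " + " · ".join(pids))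
--             lines.append("")
--         section_parts.append("\n".join(lines))
--
--     return "\n\n".join(section_parts) + "\n"
-- ===== SOURCE B (Python) =====
-- def generate_qfi_sections(plays: list) -> str:
--     """One flat (value, id) pass per field, a single global sort, then one
--     linear run-grouping scan -- no dict index and no per-group sorting."""
--     FIELDS = [
--         ("BEAT_FUNCTION",     "By Beat Function"),
--         ("FEEDBACK_TYPE",     "By Feedback Type"),
--         ("FRAME_REQUIREMENT", "By Frame Requirement"),
--         ("DWELL_TIME",        "By Dwell Time"),
--     ]
--
--     sections = []
--     for field, heading in FIELDS:
--         pairs = []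
--         for play in plays:
--             val = play.get(field, "").strip()
--             if not val:
--                 continue
--             parts = [p.strip() for p in val.split(" · ")] if " · " in val else [val]
--             for p in parts:
--                 if p:
--                     pairs.append((p, play["id"]))
--         pairs.sort()
--
--         groups = []
--         cur = None
--         for v, pid in pairs:
--             if cur is not None and cur[0] == v:
--                 cur[1].append(pid)
--             else:
--                 if cur is not None:
--                     groups.append(cur)
--                 cur = (v, [pid])
--         if cur is not None:
--             groups.append(cur)
--
--         lines = [f"### {heading}", ""]
--         for v, ids in groups:
--             lines.append(f"**{v}** ({len(ids)}): " + " · ".join(ids))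
--             lines.append("")
--         sections.append("\n".join(lines))
--
--     return "\n\n".join(sections) + "\n"
-- ===== Notes on version B (the rewrite author's own statement) =====
-- stated objective: alternative
-- what changed: Replaces A's per-field defaultdict index plus per-group .sort() plus sorted(keys) pass by one flat (value, id) pair list per field, a single lexicographic sort, and a linear run-grouping scan that emits groups with keys and ids already in order.
import Mathlib
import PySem

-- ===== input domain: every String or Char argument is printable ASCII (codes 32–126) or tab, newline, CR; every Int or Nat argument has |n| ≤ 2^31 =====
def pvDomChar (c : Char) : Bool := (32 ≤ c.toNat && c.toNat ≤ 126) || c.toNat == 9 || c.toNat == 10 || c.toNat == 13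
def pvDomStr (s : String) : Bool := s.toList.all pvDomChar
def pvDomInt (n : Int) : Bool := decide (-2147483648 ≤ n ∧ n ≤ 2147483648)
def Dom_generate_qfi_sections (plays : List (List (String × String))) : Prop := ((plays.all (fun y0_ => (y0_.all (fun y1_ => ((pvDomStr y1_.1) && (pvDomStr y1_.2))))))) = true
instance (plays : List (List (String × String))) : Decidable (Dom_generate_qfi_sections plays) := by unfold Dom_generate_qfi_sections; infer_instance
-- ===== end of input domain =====

-- B replaces A's dict index + per-group sorting + sorted-keys pass by one flat (value, id)
-- list per field, a single sort, and a linear run-grouping scan (objective: alternative).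
-- Shared helpers: the field table and Python's dict lookups on a play.
def pvFields : List (String × String) :=
  [("BEAT_FUNCTION", "By Beat Function"), ("FEEDBACK_TYPE", "By Feedback Type"),
   ("FRAME_REQUIREMENT", "By Frame Requirement"), ("DWELL_TIME", "By Dwell Time")]

def pget (play : List (String × String)) (k dflt : String) : String :=
  (PySem.Dict.ofList play).getD k dflt

def pvEntryLine (v : String) (pids : List String) : String :=
  "**" ++ v ++ "** (" ++ PySem.Int.toStr (PySem.List.len pids) ++ "): " ++ PySem.Str.join " · " pids

-- ===== PORT A =====
def generate_qfi_sections (plays : List (List (String × String))) : String :=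
  let section_parts := pvFields.foldl (fun section_parts fh =>
    let idx : PySem.Dict String (List String) :=
      plays.foldl (fun idx play =>
        let val := PySem.Str.strip (pget play fh.1 "")
        if val = "" then idx
        else if PySem.Str.isIn " · " val then
          ((PySem.Str.split? val " · ").getD []).foldl (fun idx v =>
            let v2 := PySem.Str.strip v
            if v2 ≠ "" then idx.modify v2 [] (fun l => l ++ [pget play "id" ""]) else idx) idx
        else idx.modify val [] (fun l => l ++ [pget play "id" ""])) PySem.Dict.empty
    let idx := idx.keys.foldl (fun idx v =>
      idx.modify v [] (fun l => PySem.List.sorted l (fun x => x))) idx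
    let lines := ["### " ++ fh.2, ""]
    let lines := (PySem.List.sorted idx.keys (fun x => x)).foldl (fun lines val =>
      let pids := idx.getD val []
      lines ++ [pvEntryLine val pids, ""]) lines
    section_parts ++ [PySem.Str.join "\n" lines]) []
  PySem.Str.join "\n\n" section_parts ++ "\n"

-- ===== PORT B =====
-- the linear run-grouping scan of Source B (cur = the open run, as an Option)
def groupStep (st : List (String × List String) × Option (String × List String))
    (q : String × String) : List (String × List String) × Option (String × List String) :=
  match st.2 with
  | some c => if c.1 = q.1 then (st.1, some (c.1, c.2 ++ [q.2]))
              else (st.1 ++ [c], some (q.1, [q.2]))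
  | none => (st.1, some (q.1, [q.2]))

def groupFinish (st : List (String × List String) × Option (String × List String)) :
    List (String × List String) :=
  match st.2 with
  | some c => st.1 ++ [c]
  | none => st.1

def generate_qfi_sections_alt (plays : List (List (String × String))) : String :=
  let sections := pvFields.foldl (fun sections fh =>
    let pairs := plays.foldl (fun out play =>
      let val := PySem.Str.strip (pget play fh.1 "")
      if val = "" then out
      else
        let parts := if PySem.Str.isIn " · " val then ((PySem.Str.split? val " · ").getD []).map PySem.Str.strip
                     else [val]
        parts.foldl (fun out p =>
          if p ≠ "" then out ++ [(p, pget play "id" "")] else out) out) []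
    let pairs := PySem.List.sorted2 pairs (fun q => q.1) (fun q => q.2)
    let groups := groupFinish (pairs.foldl groupStep ([], none))
    let lines := ["### " ++ fh.2, ""]
    let lines := groups.foldl (fun lines g =>
      lines ++ [pvEntryLine g.1 g.2, ""]) lines
    sections ++ [PySem.Str.join "\n" lines]) []
  PySem.Str.join "\n\n" sections ++ "\n"

-- ===== PRECONDITION & SPEC =====
-- a play "contributes" to a field iff A reaches play["id"] for it
def pvContributes (play : List (String × String)) (field : String) : Bool :=
  let val := PySem.Str.strip (pget play field "")
  if PySem.Str.isIn " · " val then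
    ((PySem.Str.split? val " · ").getD []).any (fun p => PySem.Str.strip p ≠ "")
  else val ≠ ""

-- Pre_ excludes exactly the inputs where A raises KeyError: a play with a non-blank
-- value for one of the four fields but no "id" key.
def Pre_generate_qfi_sections (plays : List (List (String × String))) : Prop :=
  ∀ play ∈ plays, (pvFields.any (fun fh => pvContributes play fh.1)) = true →
    (PySem.Dict.ofList play).contains "id" = true
instance (plays : List (List (String × String))) : Decidable (Pre_generate_qfi_sections plays) := by
  unfold Pre_generate_qfi_sections; infer_instance

def pvWitness_generate_qfi_sections : (List (List (String × String))) :=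
  [[("BEAT_FUNCTION", "tap"), ("id", "p1")], [("DWELL_TIME", "8s"), ("id", "p2")]]

def Spec_generate_qfi_sections (plays : List (List (String × String))) (out : String) : Prop := out = generate_qfi_sections_alt plays
instance (plays : List (List (String × String))) (out : String) : Decidable (Spec_generate_qfi_sections plays out) := by unfold Spec_generate_qfi_sections; infer_instance

-- ===== CLAIM (what is proved, stated in full; the proofs are below) =====
def Claim_equal_generate_qfi_sections : Prop := ∀ (plays : List (List (String × String))), Dom_generate_qfi_sections plays → Pre_generate_qfi_sections plays → Spec_generate_qfi_sections plays (generate_qfi_sections plays)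

-- ===== LEMMAS AND PROOFS =====

-- the (value, id) contribution of one play to one field
def perPlay (field : String) (play : List (String × String)) : List (String × String) :=
  let val := PySem.Str.strip (pget play field "")
  if val = "" then []
  else
    let parts := if PySem.Str.isIn " · " val then ((PySem.Str.split? val " · ").getD []).map PySem.Str.strip
                 else [val]
    ((parts.filter (fun p => decide (p ≠ ""))).map (fun p => (p, pget play "id" "")))

def pairsOf (field : String) (plays : List (List (String × String))) : List (String × String) :=
  plays.flatMap (perPlay field)

def sKeys (pairs : List (String × String)) : List String :=
  PySem.List.sorted (PySem.Set.ofList (pairs.map (fun q => q.1))) (fun x => x)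

def sIds (pairs : List (String × String)) (v : String) : List String :=
  PySem.List.sorted ((pairs.filter (fun q => q.1 == v)).map (fun q => q.2)) (fun x => x)

def dIdx (pairs : List (String × String)) : PySem.Dict String (List String) :=
  pairs.foldl (fun d q => d.modify q.1 [] (fun l => l ++ [q.2])) PySem.Dict.empty

-- lexicographic ≤ on pairs of strings
def pvLe (p q : String × String) : Prop := p.1 < q.1 ∨ (p.1 = q.1 ∧ p.2 ≤ q.2)

theorem pairsB_eq (field : String) (plays : List (List (String × String))) :
    plays.foldl (fun out play =>
      let val := PySem.Str.strip (pget play field "")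
      if val = "" then out
      else
        let parts := if PySem.Str.isIn " · " val then ((PySem.Str.split? val " · ").getD []).map PySem.Str.strip
                     else [val]
        parts.foldl (fun out p =>
          if p ≠ "" then out ++ [(p, pget play "id" "")] else out) out) [] = pairsOf field plays := by
  refine ((PySem.List.foldl_congr_mem plays _ (fun out play => out ++ perPlay field play) [] ?_).trans ?_)
  · intro acc play _
    unfold perPlay
    by_cases hv : PySem.Str.strip (pget play field "") = ""
    · simp [hv]
    · simp only [hv, if_false]
      rw [PySem.List.foldl_append_ite]
  · rw [PySem.List.foldl_append_eq_flatMap]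
    simp [pairsOf]

theorem dictA_eq (field : String) (plays : List (List (String × String))) :
    plays.foldl (fun idx play =>
        let val := PySem.Str.strip (pget play field "")
        if val = "" then idx
        else if PySem.Str.isIn " · " val then
          ((PySem.Str.split? val " · ").getD []).foldl (fun idx v =>
            let v2 := PySem.Str.strip v
            if v2 ≠ "" then idx.modify v2 [] (fun l => l ++ [pget play "id" ""]) else idx) idx
        else idx.modify val [] (fun l => l ++ [pget play "id" ""])) PySem.Dict.empty
    = dIdx (pairsOf field plays) := by
  unfold dIdx pairsOf
  rw [List.foldl_flatMap]
  refine PySem.List.foldl_congr_mem plays _ _ PySem.Dict.empty ?_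
  intro d play _
  unfold perPlay
  by_cases hv : PySem.Str.strip (pget play field "") = ""
  · simp [hv]
  · simp only [hv, if_false]
    by_cases hin : PySem.Str.isIn " · " (PySem.Str.strip (pget play field "")) = true
    · simp only [hin, if_true]
      rw [List.foldl_map, ← PySem.List.foldl_ite_eq_foldl_filter, List.foldl_map]
    · simp only [hin, Bool.false_eq_true, if_false]
      simp [hv]

def bt (p q : String × String) : Bool :=
  decide (p.1 < q.1) || (!decide (q.1 < p.1) && decide (p.2 < q.2))

theorem bt_true {p q : String × String} (h : bt p q = true) : pvLe p q := by
  unfold bt at h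
  simp only [Bool.or_eq_true, Bool.and_eq_true, Bool.not_eq_true', decide_eq_true_iff,
    decide_eq_false_iff_not] at h
  rcases h with h | ⟨h1, h2⟩
  · exact Or.inl h
  · rcases lt_trichotomy p.1 q.1 with hlt | heq | hgt
    · exact Or.inl hlt
    · exact Or.inr ⟨heq, le_of_lt h2⟩
    · exact absurd hgt h1

theorem bt_false {p q : String × String} (h : bt p q = false) : pvLe q p := by
  unfold bt at h
  simp only [Bool.or_eq_false_iff, Bool.and_eq_false_iff, Bool.not_eq_false', decide_eq_true_iff,
    decide_eq_false_iff_not] at h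
  obtain ⟨h1, h2⟩ := h
  rcases h2 with h2 | h2
  · exact Or.inl h2
  · rcases lt_trichotomy p.1 q.1 with hlt | heq | hgt
    · exact absurd hlt h1
    · exact Or.inr ⟨heq.symm, le_of_not_gt h2⟩
    · exact Or.inl hgt

theorem pvLe_trans {a b c : String × String} (h1 : pvLe a b) (h2 : pvLe b c) : pvLe a c := by
  rcases h1 with h1 | ⟨e1, l1⟩ <;> rcases h2 with h2 | ⟨e2, l2⟩
  · exact Or.inl (h1.trans h2)
  · exact Or.inl (e2 ▸ h1)
  · exact Or.inl (e1 ▸ h2)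
  · exact Or.inr ⟨e1.trans e2, l1.trans l2⟩

theorem pvLe_antisymm {a b : String × String} (h1 : pvLe a b) (h2 : pvLe b a) : a = b := by
  rcases h1 with h1 | ⟨e1, l1⟩
  · rcases h2 with h2 | ⟨e2, l2⟩
    · exact absurd (h1.trans h2) (lt_irrefl _)
    · exact absurd h1 (e2 ▸ lt_irrefl _)
  · rcases h2 with h2 | ⟨e2, l2⟩
    · exact absurd h2 (e1 ▸ lt_irrefl _)
    · exact Prod.ext e1 (le_antisymm l1 l2)

theorem insertBy_pairwise_pvLe (x : String × String) (l : List (String × String))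
    (hl : l.Pairwise pvLe) : (PySem.List.insertBy bt x l).Pairwise pvLe := by
  induction l with
  | nil => simp [PySem.List.insertBy]
  | cons y ys ih =>
    rw [show PySem.List.insertBy bt x (y :: ys)
        = if bt x y then x :: y :: ys else y :: PySem.List.insertBy bt x ys from rfl]
    rcases List.pairwise_cons.mp hl with ⟨hy, hys⟩
    cases hb : bt x y with
    | true =>
      simp only [if_true]
      refine List.pairwise_cons.mpr ⟨?_, hl⟩
      intro z hz
      rcases List.mem_cons.mp hz with rfl | hz
      · exact bt_true hb
      · exact pvLe_trans (bt_true hb) (hy z hz)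
    | false =>
      simp only [Bool.false_eq_true, if_false]
      refine List.pairwise_cons.mpr ⟨?_, ih hys⟩
      intro z hz
      rcases (PySem.List.mem_insertBy bt x z ys).mp hz with rfl | hz
      · exact bt_false hb
      · exact hy z hz

theorem sorted2_pairwise_pvLe (pairs : List (String × String)) :
    (PySem.List.sorted2 pairs (fun q => q.1) (fun q => q.2)).Pairwise pvLe := by
  show (List.foldl (fun acc x => PySem.List.insertBy bt x acc) [] pairs).Pairwise pvLe
  have main : ∀ (l init : List (String × String)), init.Pairwise pvLe →
      (l.foldl (fun acc x => PySem.List.insertBy bt x acc) init).Pairwise pvLe := by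
    intro l
    induction l with
    | nil => intro init h; simpa using h
    | cons x xs ih => intro init h; exact ih _ (insertBy_pairwise_pvLe x init h)
  exact main pairs [] (by simp)

theorem sKeys_lt (pairs : List (String × String)) : (sKeys pairs).Pairwise (· < ·) :=
  PySem.List.sorted_ofList_pairwise_lt _

theorem sKeys_nodup (pairs : List (String × String)) : (sKeys pairs).Nodup :=
  (PySem.List.sorted_perm _ _ _).symm.nodup (PySem.Set.nodup_ofList _)

theorem mem_sKeys (pairs : List (String × String)) (v : String) :
    v ∈ sKeys pairs ↔ v ∈ pairs.map (fun q => q.1) := by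
  simp [sKeys, PySem.List.mem_sorted, PySem.Set.mem_ofList]

theorem sIds_ne_nil (pairs : List (String × String)) (v : String) (hv : v ∈ sKeys pairs) :
    sIds pairs v ≠ [] := by
  rw [mem_sKeys] at hv
  rcases List.mem_map.mp hv with ⟨q, hq, hq1⟩
  intro h
  rw [sIds, PySem.List.sorted_eq_nil_iff, List.map_eq_nil_iff, List.filter_eq_nil_iff] at h
  exact h q hq (by simp [hq1])

theorem sIds_perm (pairs : List (String × String)) (v : String) :
    ((sIds pairs v).map (fun i => (v, i))).Perm (pairs.filter (fun q => q.1 == v)) := by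
  have h1 := (PySem.List.sorted_perm ((pairs.filter (fun q => q.1 == v)).map (fun q => q.2))
    (fun x => x) false).map (fun i => (v, i))
  refine h1.trans ?_
  rw [List.map_map]
  have h2 : ∀ q ∈ pairs.filter (fun q => q.1 == v),
      ((fun i => (v, i)) ∘ fun q : String × String => q.2) q = id q := by
    intro q hq
    have hv : q.1 = v := by simpa using List.of_mem_filter hq
    simp [Function.comp, ← hv]
  rw [List.map_congr_left h2, List.map_id]

theorem flatMap_filter_perm : ∀ (ks : List String) (l : List (String × String)), ks.Nodup →
    (∀ q ∈ l, q.1 ∈ ks) →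
    (ks.flatMap (fun v => l.filter (fun q => q.1 == v))).Perm l := by
  intro ks
  induction ks with
  | nil =>
    intro l _ hc
    have : l = [] := by
      cases l with
      | nil => rfl
      | cons a t => exact absurd (hc a (by simp)) (by simp)
    simp [this]
  | cons v ks ih =>
    intro l hnd hc
    rcases List.nodup_cons.mp hnd with ⟨hv, hnd'⟩
    rw [List.flatMap_cons]
    have hrest : ∀ w ∈ ks, l.filter (fun q => q.1 == w)
        = (l.filter (fun q => !(q.1 == v))).filter (fun q => q.1 == w) := by
      intro w hw
      rw [List.filter_filter]
      apply List.filter_congr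
      intro q _
      cases hqw : (q.1 == w) with
      | false => simp
      | true =>
        have : q.1 = w := by simpa using hqw
        have hne : ¬ q.1 = v := by
          rw [this]; intro h; exact hv (h ▸ hw)
        simp [hne]
    rw [List.flatMap_congr hrest]
    have hperm := ih (l.filter (fun q => !(q.1 == v))) hnd' (by
      intro q hq
      have hmem := List.mem_of_mem_filter hq
      have hne : ¬ (q.1 == v) = true := by simpa using List.of_mem_filter hq
      rcases List.mem_cons.mp (hc q hmem) with h | h
      · exact absurd (by simp [h]) hne
      · exact h)
    exact ((hperm).append_left (l.filter (fun q => q.1 == v))).trans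
      (List.filter_append_perm (fun q => q.1 == v) l)

theorem blocks_perm (pairs : List (String × String)) :
    ((sKeys pairs).flatMap (fun v => (sIds pairs v).map (fun i => (v, i)))).Perm pairs := by
  refine (List.Perm.flatMap_left (sKeys pairs) (fun v _ => sIds_perm pairs v)).trans ?_
  refine flatMap_filter_perm (sKeys pairs) pairs (sKeys_nodup pairs) ?_
  intro q hq
  exact (mem_sKeys pairs q.1).mpr (List.mem_map_of_mem hq)

theorem blocks_pairwise (pairs : List (String × String)) :
    ((sKeys pairs).flatMap (fun v => (sIds pairs v).map (fun i => (v, i)))).Pairwise pvLe := by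
  have main : ∀ ks : List String, ks.Pairwise (· < ·) →
      (ks.flatMap (fun v => (sIds pairs v).map (fun i => (v, i)))).Pairwise pvLe := by
    intro ks
    induction ks with
    | nil => intro _; simp
    | cons v ks ih =>
      intro hp
      rcases List.pairwise_cons.mp hp with ⟨hv, hp'⟩
      rw [List.flatMap_cons, List.pairwise_append]
      refine ⟨?_, ih hp', ?_⟩
      · refine List.Pairwise.map _ (fun a b hab => Or.inr ⟨rfl, hab⟩) ?_
        exact PySem.List.sorted_pairwise _ _
      · intro a ha b hb
        rcases List.mem_map.mp ha with ⟨i, _, rfl⟩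
        rcases List.mem_flatMap.mp hb with ⟨w, hw, hbw⟩
        rcases List.mem_map.mp hbw with ⟨j, _, rfl⟩
        exact Or.inl (hv w hw)
  exact main (sKeys pairs) (sKeys_lt pairs)

theorem main_sort (pairs : List (String × String)) :
    PySem.List.sorted2 pairs (fun q => q.1) (fun q => q.2)
    = (sKeys pairs).flatMap (fun v => (sIds pairs v).map (fun i => (v, i))) := by
  refine List.Perm.eq_of_pairwise (fun a b _ _ hab hba => pvLe_antisymm hab hba)
    (sorted2_pairwise_pvLe pairs) (blocks_pairwise pairs) ?_
  exact (PySem.List.sorted2_perm pairs _ _ false).trans (blocks_perm pairs).symm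

theorem groupStep_run (v : String) : ∀ (ids : List String) (gs : List (String × List String))
    (cids : List String),
    ((ids.map (fun i => (v, i))).foldl groupStep (gs, some (v, cids)))
    = (gs, some (v, cids ++ ids)) := by
  intro ids
  induction ids with
  | nil => intro gs cids; simp
  | cons i t ih =>
    intro gs cids
    rw [List.map_cons, List.foldl_cons]
    rw [show groupStep (gs, some (v, cids)) (v, i) = (gs, some (v, cids ++ [i])) from by
      simp [groupStep]]
    rw [ih gs (cids ++ [i])]
    simp

theorem group_aux (f : String → List String) : ∀ (ks : List String), ks.Pairwise (· ≠ ·) →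
    (∀ v ∈ ks, f v ≠ []) →
    ∀ (gs : List (String × List String)) (c : String × List String), c.1 ∉ ks →
    groupFinish ((ks.flatMap (fun v => (f v).map (fun i => (v, i)))).foldl groupStep (gs, some c))
    = gs ++ [c] ++ ks.map (fun v => (v, f v)) := by
  intro ks
  induction ks with
  | nil => intro _ _ gs c _; simp [groupFinish]
  | cons v ks ih =>
    intro hp hne gs c hc
    rcases List.pairwise_cons.mp hp with ⟨hv, hp'⟩
    obtain ⟨i, ids, hf⟩ : ∃ i ids, f v = i :: ids := by
      cases h : f v with
      | nil => exact absurd h (hne v (by simp))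
      | cons a b => exact ⟨a, b, rfl⟩
    rw [List.flatMap_cons, hf, List.map_cons, List.foldl_append, List.foldl_cons]
    rw [show groupStep (gs, some c) (v, i) = (gs ++ [c], some (v, [i])) from by
      simp [groupStep, show ¬ c.1 = v from fun h => hc (h ▸ List.mem_cons_self ..)]]
    rw [groupStep_run v ids (gs ++ [c]) [i]]
    have hids : [i] ++ ids = f v := by simp [hf]
    rw [hids]
    rw [ih hp' (fun w hw => hne w (List.mem_cons_of_mem v hw)) (gs ++ [c]) (v, f v)
      (fun h => hv v h rfl)]
    simp

theorem group_runs (ks : List String) (f : String → List String)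
    (hnd : ks.Pairwise (· ≠ ·)) (hne : ∀ v ∈ ks, f v ≠ []) :
    groupFinish ((ks.flatMap (fun v => (f v).map (fun i => (v, i)))).foldl groupStep ([], none))
    = ks.map (fun v => (v, f v)) := by
  cases ks with
  | nil => simp [groupFinish]
  | cons v ks =>
    rcases List.pairwise_cons.mp hnd with ⟨hv, hnd'⟩
    obtain ⟨i, ids, hf⟩ : ∃ i ids, f v = i :: ids := by
      cases h : f v with
      | nil => exact absurd h (hne v (by simp))
      | cons a b => exact ⟨a, b, rfl⟩
    rw [List.flatMap_cons, hf, List.map_cons, List.foldl_append, List.foldl_cons]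
    rw [show groupStep (([], none) : List (String × List String) × Option (String × List String))
        (v, i) = ([], some (v, [i])) from by simp [groupStep]]
    rw [groupStep_run v ids [] [i]]
    have hids : [i] ++ ids = f v := by simp [hf]
    rw [hids]
    rw [group_aux f ks hnd' (fun w hw => hne w (List.mem_cons_of_mem v hw)) [] (v, f v)
      (fun h => hv v h rfl)]
    simp

theorem dIdx_keys (pairs : List (String × String)) :
    (dIdx pairs).keys = PySem.Set.ofList (pairs.map (fun q => q.1)) := by
  unfold dIdx
  rw [PySem.Dict.keys_foldl_modify_key pairs (fun q => q.1) []
    (fun _ q => fun l => l ++ [q.2]) PySem.Dict.empty]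
  rw [PySem.Dict.keys_empty, PySem.Set.update_nil_left]

theorem dIdx_getD (pairs : List (String × String)) (v : String) :
    (dIdx pairs).getD v [] = (pairs.filter (fun q => q.1 == v)).map (fun q => q.2) := by
  unfold dIdx
  rw [PySem.Dict.getD_foldl_modify_append pairs PySem.Dict.empty v]
  simp

theorem set_update_self (s : PySem.Set String) : PySem.Set.update s s = s := by
  rw [PySem.Set.update_eq_append_filter]
  have : (PySem.Set.ofList s).filter (fun y => !(PySem.Set.contains s y)) = [] := by
    rw [List.filter_eq_nil_iff]
    intro y hy
    simp [(PySem.Set.mem_ofList s y).mp hy]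
  rw [this, List.append_nil]

theorem sortpass_getD : ∀ (ks : List String), ks.Nodup →
    ∀ (d : PySem.Dict String (List String)) (w : String),
    ((ks.foldl (fun d v => d.modify v [] (fun l => PySem.List.sorted l (fun x => x))) d).getD w [])
    = if w ∈ ks then PySem.List.sorted (d.getD w []) (fun x => x) else d.getD w [] := by
  intro ks
  induction ks with
  | nil => intro _ d w; simp
  | cons v ks ih =>
    intro hnd d w
    rcases List.nodup_cons.mp hnd with ⟨hv, hnd'⟩
    rw [List.foldl_cons, ih hnd']
    by_cases hw : w ∈ ks
    · have hwv : ¬ w = v := fun h => hv (h ▸ hw)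
      simp only [List.mem_cons, hw, or_true, if_true]
      rw [PySem.Dict.getD_modify, if_neg hwv]
    · by_cases hwv : w = v
      · subst hwv
        simp only [hw, if_false, List.mem_cons, true_or, if_true]
        rw [PySem.Dict.getD_modify, if_pos rfl]
      · simp only [hw, if_false, List.mem_cons, hwv, false_or]
        rw [PySem.Dict.getD_modify, if_neg hwv]

theorem sortpass_keys (d : PySem.Dict String (List String)) :
    (d.keys.foldl (fun d v => d.modify v [] (fun l => PySem.List.sorted l (fun x => x))) d).keys
    = d.keys := by
  rw [PySem.Dict.keys_foldl_modify_key d.keys (fun v => v) []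
    (fun _ v => fun l => PySem.List.sorted l (fun x => x)) d]
  rw [List.map_id']
  exact set_update_self d.keys

-- ===== VERDICT (by name: the statement is the Claim_ definition above) =====
theorem generate_qfi_sections_spec : Claim_equal_generate_qfi_sections := by
  unfold Claim_equal_generate_qfi_sections
  intro plays _ _
  unfold Spec_generate_qfi_sections
  unfold generate_qfi_sections generate_qfi_sections_alt
  refine congrArg (fun s => s ++ "\n") (congrArg (PySem.Str.join "\n\n") ?_)
  refine PySem.List.foldl_congr_mem pvFields _ _ [] ?_
  intro acc fh _
  dsimp only []
  refine congrArg (fun l => acc ++ [PySem.Str.join "\n" l]) ?_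
  rw [dictA_eq fh.1 plays, pairsB_eq fh.1 plays]
  rw [sortpass_keys _, dIdx_keys]
  rw [main_sort (pairsOf fh.1 plays)]
  rw [group_runs (sKeys (pairsOf fh.1 plays)) (sIds (pairsOf fh.1 plays))
    ((sKeys_lt (pairsOf fh.1 plays)).imp (fun h => ne_of_lt h))
    (sIds_ne_nil (pairsOf fh.1 plays))]
  rw [PySem.List.foldl_append_eq_flatMap, PySem.List.foldl_append_eq_flatMap]
  rw [List.flatMap_map]
  refine congrArg (fun l => ["### " ++ fh.2, ""] ++ l) ?_
  refine List.flatMap_congr ?_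
  intro v hv
  have hvm : v ∈ PySem.Set.ofList ((pairsOf fh.1 plays).map (fun q => q.1)) :=
    (PySem.List.mem_sorted _ _ _ v).mp hv
  rw [sortpass_getD _ (PySem.Set.nodup_ofList _), if_pos hvm, dIdx_getD]
  rfl
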